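-- pv_equiv track=rewrite | github.com/MINAsamehj/IEEE-CS-25 | Rookies/Task6/C-Send The Fool Further.py | solve
-- ===== SOURCE A (Python) =====
-- def dfs(node, graph, visited, current_cost):
--     is_leaf = True
--     max_cost = current_cost
--
--     for neighbor, cost in graph[node]:
--         if not visited[neighbor]:
--             visited[neighbor] = True
--             is_leaf = False
--             max_cost = max(max_cost, dfs(neighbor, graph, visited, current_cost + cost))
--             visited[neighbor] = False
--
--     return current_cost if is_leaf else max_cost
--
-- def solve(n, edges):
--     graph = {i: [] for i in range(n)}
--     for u, v, c in edges:
--         graph[u].append((v, c))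
--         graph[v].append((u, c))
--
--     visited = [False] * n
--     visited[0] = True
--     return dfs(0, graph, visited, 0)
-- ===== SOURCE B (Python) =====
-- def solve(n, edges):
--     graph = {i: [] for i in range(n)}
--     for u, v, c in edges:
--         graph[u].append((v, c))
--         graph[v].append((u, c))
--
--     visited = [False] * n
--     visited[0] = True
--     best = 0
--     stack = [(0, 0, visited)]
--     while stack:
--         node, cost, vis = stack.pop()
--         if cost > best:
--             best = cost
--         for nb, c in graph[node]:
--             if not vis[nb]:
--                 nvis = vis.copy()
--                 nvis[nb] = True
--                 stack.append((nb, cost + c, nvis))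
--     return best
-- ===== Notes on version B (the rewrite author's own statement) =====
-- stated objective: alternative
-- what changed: The recursive mark/unmark backtracking DFS (with is_leaf flag and threaded current_cost) is replaced by an iterative worklist loop over an explicit stack of (node, accumulated cost, private visited copy) states that simply takes the running max of the cost of every popped state; no backtracking, no recursion, no leaf test.
import Mathlib
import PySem

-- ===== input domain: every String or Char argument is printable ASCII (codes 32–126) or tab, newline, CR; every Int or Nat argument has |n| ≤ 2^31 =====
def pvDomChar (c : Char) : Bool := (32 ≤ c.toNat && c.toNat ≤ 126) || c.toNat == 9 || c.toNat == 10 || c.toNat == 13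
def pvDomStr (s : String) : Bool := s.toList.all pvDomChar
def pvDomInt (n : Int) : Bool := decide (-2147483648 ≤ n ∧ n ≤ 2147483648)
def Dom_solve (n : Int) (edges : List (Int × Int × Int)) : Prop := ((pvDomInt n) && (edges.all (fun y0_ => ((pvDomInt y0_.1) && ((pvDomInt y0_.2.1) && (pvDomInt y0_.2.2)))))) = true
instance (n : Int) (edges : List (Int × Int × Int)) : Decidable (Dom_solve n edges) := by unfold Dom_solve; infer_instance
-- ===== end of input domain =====

-- B replaces A's recursive mark/unmark backtracking DFS by an iterative worklist loop over
-- (node, cost, visited-copy) states that maxes the cost of every popped state (objective: alternative).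

-- ===== PORT A =====

-- termination helper for the DFS recursion: setting a False visited cell to True lowers the False count
theorem pv_countP_set_true (l : List Bool) (j : Nat) (h : l.getD j true = false) :
    (l.set j true).countP (fun b => !b) + 1 = l.countP (fun b => !b) := by
  induction l generalizing j with
  | nil => simp [List.getD] at h
  | cons b t ih =>
    cases j with
    | zero => simp_all
    | succ j =>
      have := ih j (by simpa using h)
      simp only [List.set_cons_succ, List.countP_cons]
      omega

-- dfs's `for` loop over graph[node], carrying (is_leaf, max_cost); the recursive dfs call is
-- inlined as a call with the neighbour's adjacency list and is_leaf = true, max_cost = current_cost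
-- (`visited[nb] = True … visited[nb] = False` net-restores `visited`, so siblings reuse `visited`).
-- `not visited[neighbor]` is ported as `0 ≤ nb ∧ visited.getD nb.toNat true = false`: exact whenever
-- `nb` is in range (guaranteed by Pre_solve); where Python would wrap a negative index or raise
-- IndexError — outside Pre_solve — this port just skips the neighbour.
def dfsLoopA (g : PySem.Dict Int (List (Int × Int))) (visited : List Bool)
    (nbrs : List (Int × Int)) (isLeaf : Bool) (maxCost c : Int) : Int :=
  match nbrs with
  | [] => if isLeaf then c else maxCost
  | (nb, w) :: rest =>
    if h : 0 ≤ nb ∧ visited.getD nb.toNat true = false then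
      let r := dfsLoopA g (visited.set nb.toNat true) (g.getD nb []) true (c + w) (c + w)
      dfsLoopA g visited rest false (max maxCost r) c
    else
      dfsLoopA g visited rest isLeaf maxCost c
termination_by (visited.countP (fun b => !b), nbrs.length)
decreasing_by
  · exact Prod.Lex.left _ _ (by have := pv_countP_set_true visited nb.toNat h.2; omega)
  · exact Prod.Lex.right _ (by simp)
  · exact Prod.Lex.right _ (by simp)

-- dfs(node, graph, visited, current_cost)
def dfsA (g : PySem.Dict Int (List (Int × Int))) (visited : List Bool) (node c : Int) : Int :=
  dfsLoopA g visited (g.getD node []) true c c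

-- `{i: [] for i in range(n)}` has distinct keys, so the comprehension is literally the entry list
-- (i, []) for i in range(n), in insertion order.  graph[u].append(..) is `modify` with default []:
-- exact when u is a key (0 ≤ u < n, i.e. inside Pre_solve); where Python raises KeyError —
-- outside Pre_solve — modify silently inserts.
def solve (n : Int) (edges : List (Int × Int × Int)) : Int :=
  let graph := edges.foldl
    (fun g e => (g.modify e.1 [] (fun l => l ++ [(e.2.1, e.2.2)])).modify e.2.1 [] (fun l => l ++ [(e.1, e.2.2)]))
    (PySem.Dict.mk ((PySem.List.pyRange 0 n 1).map (fun i => (i, []))))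
  let visited := PySem.List.pySetD (PySem.List.pyRepeat [false] n) 0 true
  dfsA graph visited 0 0

-- ===== PORT B =====

-- `for nb, c in graph[node]: if not vis[nb]: push (nb, cost+c, vis with nb marked)`;
-- pushed frames cons onto the stack head, so the last neighbour is popped first = list.pop().
-- vis[nb] is ported with the same in-range guard as in port A (exact inside Pre_solve).
def pushLoopB (vis : List Bool) (cost : Int) (nbrs : List (Int × Int))
    (stk : List (Int × Int × List Bool)) : List (Int × Int × List Bool) :=
  nbrs.foldl
    (fun s x =>
      if 0 ≤ x.1 ∧ vis.getD x.1.toNat true = false then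
        (x.1, cost + x.2, vis.set x.1.toNat true) :: s
      else s) stk

-- the `while stack:` loop, made total with fuel (solve_alt passes a provably sufficient amount,
-- so the fuel-exhaustion branch is never taken there)
def runB (g : PySem.Dict Int (List (Int × Int))) :
    Nat → List (Int × Int × List Bool) → Int → Int
  | _, [], best => best
  | 0, _ :: _, best => best
  | Nat.succ f, (node, cost, vis) :: stk, best =>
      runB g f (pushLoopB vis cost (g.getD node []) stk)
        (if best < cost then cost else best)

def solve_alt (n : Int) (edges : List (Int × Int × Int)) : Int :=
  let graph := edges.foldl
    (fun g e => (g.modify e.1 [] (fun l => l ++ [(e.2.1, e.2.2)])).modify e.2.1 [] (fun l => l ++ [(e.1, e.2.2)]))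
    (PySem.Dict.mk ((PySem.List.pyRange 0 n 1).map (fun i => (i, []))))
  let visited := PySem.List.pySetD (PySem.List.pyRepeat [false] n) 0 true
  runB graph ((2 * edges.length + 1) ^ n.toNat) [(0, 0, visited)] 0

-- ===== PRECONDITION & SPEC =====
-- Pre_solve excludes exactly the inputs on which Python A raises: n ≤ 0 (IndexError on
-- visited[0] = True) and edges with an endpoint outside range(n) (KeyError on graph[u]/graph[v]).
def Pre_solve (n : Int) (edges : List (Int × Int × Int)) : Prop :=
  1 ≤ n ∧ ∀ e ∈ edges, 0 ≤ e.1 ∧ e.1 < n ∧ 0 ≤ e.2.1 ∧ e.2.1 < n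
instance (n : Int) (edges : List (Int × Int × Int)) : Decidable (Pre_solve n edges) := by
  unfold Pre_solve; infer_instance

def pvWitness_solve : Int × (List (Int × Int × Int)) := (3, [(0, 1, 5), (1, 2, -2)])

def Spec_solve (n : Int) (edges : List (Int × Int × Int)) (out : Int) : Prop := out = solve_alt n edges
instance (n : Int) (edges : List (Int × Int × Int)) (out : Int) : Decidable (Spec_solve n edges out) := by unfold Spec_solve; infer_instance

-- ===== CLAIM (what is proved, stated in full; the proofs are below) =====
def Claim_equal_solve : Prop := ∀ (n : Int) (edges : List (Int × Int × Int)), Dom_solve n edges → Pre_solve n edges → Spec_solve n edges (solve n edges)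

-- ===== LEMMAS AND PROOFS =====

-- value of one neighbour step of A's loop
def stepA (g : PySem.Dict Int (List (Int × Int))) (vis : List Bool) (c : Int)
    (m : Int) (x : Int × Int) : Int :=
  if 0 ≤ x.1 ∧ vis.getD x.1.toNat true = false then
    max m (dfsLoopA g (vis.set x.1.toNat true) (g.getD x.1 []) true (c + x.2) (c + x.2))
  else m

theorem dfsLoopA_false (g : PySem.Dict Int (List (Int × Int))) (vis : List Bool) :
    ∀ (nbrs : List (Int × Int)) (maxc c : Int),
      dfsLoopA g vis nbrs false maxc c = nbrs.foldl (stepA g vis c) maxc := by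
  intro nbrs
  induction nbrs with
  | nil => intro maxc c; rw [dfsLoopA]; rfl
  | cons x rest ih =>
    intro maxc c
    obtain ⟨nb, w⟩ := x
    by_cases h : 0 ≤ nb ∧ vis.getD nb.toNat true = false
    · rw [dfsLoopA]; simp only [h, and_self, dite_true, ih, List.foldl_cons, stepA, if_true]
    · rw [dfsLoopA]; simp only [h, dite_false, ih, List.foldl_cons, stepA]; simp

theorem dfsLoopA_true (g : PySem.Dict Int (List (Int × Int))) (vis : List Bool) :
    ∀ (nbrs : List (Int × Int)) (c : Int),
      dfsLoopA g vis nbrs true c c = nbrs.foldl (stepA g vis c) c := by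
  intro nbrs
  induction nbrs with
  | nil => intro c; rw [dfsLoopA]; rfl
  | cons x rest ih =>
    intro c
    obtain ⟨nb, w⟩ := x
    by_cases h : 0 ≤ nb ∧ vis.getD nb.toNat true = false
    · rw [dfsLoopA]
      simp only [h, and_self, dite_true, dfsLoopA_false, List.foldl_cons, stepA, if_true]
    · rw [dfsLoopA]; simp only [h, dite_false, ih, List.foldl_cons, stepA]; simp

theorem le_foldl_stepA (g : PySem.Dict Int (List (Int × Int))) (vis : List Bool) (c : Int) :
    ∀ (nbrs : List (Int × Int)) (a : Int), a ≤ nbrs.foldl (stepA g vis c) a := by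
  intro nbrs
  induction nbrs with
  | nil => intro a; simp
  | cons x rest ih =>
    intro a
    refine le_trans ?_ (ih (stepA g vis c a x))
    unfold stepA
    split_ifs <;> simp

theorem foldl_stepA_max (g : PySem.Dict Int (List (Int × Int))) (vis : List Bool) (c : Int) :
    ∀ (nbrs : List (Int × Int)) (y a : Int),
      nbrs.foldl (stepA g vis c) (max y a) = max y (nbrs.foldl (stepA g vis c) a) := by
  intro nbrs
  induction nbrs with
  | nil => intro y a; rfl
  | cons x rest ih =>
    intro y a
    simp only [List.foldl_cons]
    have hs : stepA g vis c (max y a) x = max y (stepA g vis c a x) := by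
      unfold stepA; split_ifs <;> simp [max_assoc]
    rw [hs, ih]

-- value of one frame of B's stack = A's dfs on that frame
def mstep (g : PySem.Dict Int (List (Int × Int))) (b : Int) (fr : Int × Int × List Bool) : Int :=
  max b (dfsLoopA g fr.2.2 (g.getD fr.1 []) true fr.2.1 fr.2.1)

def childrenB (vis : List Bool) (cost : Int) (nbrs : List (Int × Int)) :
    List (Int × Int × List Bool) :=
  nbrs.filterMap (fun x =>
    if 0 ≤ x.1 ∧ vis.getD x.1.toNat true = false then
      some (x.1, cost + x.2, vis.set x.1.toNat true)
    else none)

theorem pushLoopB_eq (vis : List Bool) (cost : Int) :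
    ∀ (nbrs : List (Int × Int)) (stk : List (Int × Int × List Bool)),
      pushLoopB vis cost nbrs stk = (childrenB vis cost nbrs).reverse ++ stk := by
  intro nbrs
  induction nbrs with
  | nil => intro stk; rfl
  | cons x rest ih =>
    intro stk
    by_cases h : 0 ≤ x.1 ∧ vis.getD x.1.toNat true = false
    · simp only [pushLoopB, List.foldl_cons, if_pos h] at *
      rw [ih]
      simp only [childrenB, List.filterMap_cons, if_pos h]
      simp
    · simp only [pushLoopB, List.foldl_cons, if_neg h] at *
      rw [ih]
      simp only [childrenB, List.filterMap_cons, if_neg h]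

theorem foldl_mstep_max (g : PySem.Dict Int (List (Int × Int))) :
    ∀ (l : List (Int × Int × List Bool)) (y a : Int),
      l.foldl (mstep g) (max y a) = max y (l.foldl (mstep g) a) := by
  intro l
  induction l with
  | nil => intro y a; rfl
  | cons fr rest ih =>
    intro y a
    simp only [List.foldl_cons, mstep, max_assoc]
    rw [ih]

theorem foldl_mstep_reverse (g : PySem.Dict Int (List (Int × Int))) :
    ∀ (l : List (Int × Int × List Bool)) (a : Int),
      l.reverse.foldl (mstep g) a = l.foldl (mstep g) a := by
  intro l
  induction l with
  | nil => intro a; rfl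
  | cons fr rest ih =>
    intro a
    rw [List.reverse_cons, List.foldl_append, ih]
    simp only [List.foldl_cons, List.foldl_nil, mstep]
    rw [max_comm a _, foldl_mstep_max, max_comm]

theorem foldl_mstep_children (g : PySem.Dict Int (List (Int × Int))) (vis : List Bool) (cost : Int) :
    ∀ (nbrs : List (Int × Int)) (a : Int),
      (childrenB vis cost nbrs).foldl (mstep g) a = nbrs.foldl (stepA g vis cost) a := by
  intro nbrs
  induction nbrs with
  | nil => intro a; rfl
  | cons x rest ih =>
    intro a
    by_cases h : 0 ≤ x.1 ∧ vis.getD x.1.toNat true = false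
    · simp only [childrenB, List.filterMap_cons, if_pos h] at *
      simp only [List.foldl_cons, ih, mstep, stepA, if_pos h]
    · simp only [childrenB, List.filterMap_cons, if_neg h] at *
      simp only [List.foldl_cons, ih, stepA, if_neg h]

-- potential of a stack: Σ (L+1)^(number of unvisited cells of the frame)
def potB (L : Nat) (stk : List (Int × Int × List Bool)) : Nat :=
  (stk.map (fun fr => (L + 1) ^ (fr.2.2.countP (fun b => !b)))).sum

theorem runB_eq (g : PySem.Dict Int (List (Int × Int))) (L : Nat)
    (hL : ∀ m : Int, (g.getD m []).length ≤ L) :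
    ∀ (fuel : Nat) (stk : List (Int × Int × List Bool)) (best : Int),
      potB L stk ≤ fuel → runB g fuel stk best = stk.foldl (mstep g) best := by
  intro fuel
  induction fuel with
  | zero =>
    intro stk best hpot
    cases stk with
    | nil => rfl
    | cons fr rest =>
      exfalso
      have h1 : 1 ≤ (L + 1) ^ (fr.2.2.countP (fun b => !b)) := Nat.one_le_pow _ _ (by omega)
      simp only [potB, List.map_cons, List.sum_cons] at hpot
      omega
  | succ f ih =>
    intro stk best hpot
    cases stk with
    | nil => rfl
    | cons fr rest =>
      obtain ⟨node, cost, vis⟩ := fr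
      rw [runB, pushLoopB_eq]
      have hmem : ∀ fr' ∈ childrenB vis cost (g.getD node []),
          fr'.2.2.countP (fun b => !b) + 1 = vis.countP (fun b => !b) := by
        intro fr' hfr'
        obtain ⟨x, _, hx⟩ := List.mem_filterMap.mp hfr'
        by_cases hc : 0 ≤ x.1 ∧ vis.getD x.1.toNat true = false
        · rw [if_pos hc] at hx
          obtain rfl := Option.some.inj hx
          exact pv_countP_set_true vis x.1.toNat hc.2
        · rw [if_neg hc] at hx; exact absurd hx (by simp)
      have hlen : (childrenB vis cost (g.getD node [])).length ≤ L :=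
        le_trans (List.length_filterMap_le _ _) (hL node)
      have hpot2 : (L + 1) ^ (vis.countP (fun b => !b)) + potB L rest ≤ f + 1 := by
        simpa only [potB, List.map_cons, List.sum_cons] using hpot
      have hpot' : potB L ((childrenB vis cost (g.getD node [])).reverse ++ rest) ≤ f := by
        have hsplit : potB L ((childrenB vis cost (g.getD node [])).reverse ++ rest)
            = potB L (childrenB vis cost (g.getD node [])) + potB L rest := by
          simp [potB]
        rw [hsplit]
        by_cases hch : childrenB vis cost (g.getD node []) = []
        · have h1 : 1 ≤ (L + 1) ^ (vis.countP (fun b => !b)) := Nat.one_le_pow _ _ (by omega)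
          rw [hch]
          have h0 : potB L ([] : List (Int × Int × List Bool)) = 0 := rfl
          rw [h0]
          omega
        · obtain ⟨c0, hc0⟩ := List.exists_mem_of_ne_nil _ hch
          have hk : 1 ≤ vis.countP (fun b => !b) := by have := hmem c0 hc0; omega
          have hsum : potB L (childrenB vis cost (g.getD node []))
              ≤ (childrenB vis cost (g.getD node [])).length
                  * (L + 1) ^ (vis.countP (fun b => !b) - 1) := by
            have := List.sum_le_card_nsmul
              ((childrenB vis cost (g.getD node [])).map
                (fun fr => (L + 1) ^ (fr.2.2.countP (fun b => !b))))
              ((L + 1) ^ (vis.countP (fun b => !b) - 1))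
              (by
                intro v hv
                obtain ⟨fr', hfr', rfl⟩ := List.mem_map.mp hv
                have h2 := hmem fr' hfr'
                have h3 : fr'.2.2.countP (fun b => !b) = vis.countP (fun b => !b) - 1 := by omega
                rw [h3])
            simpa [potB] using this
          have hX : 1 ≤ (L + 1) ^ (vis.countP (fun b => !b) - 1) := Nat.one_le_pow _ _ (by omega)
          have hexp : (L + 1) ^ (vis.countP (fun b => !b))
              = (L + 1) ^ (vis.countP (fun b => !b) - 1) * (L + 1) := by
            rw [← pow_succ]
            congr 1
            omega
          rw [hexp] at hpot2
          have hmul : (childrenB vis cost (g.getD node [])).length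
                  * (L + 1) ^ (vis.countP (fun b => !b) - 1)
              ≤ L * (L + 1) ^ (vis.countP (fun b => !b) - 1) :=
            Nat.mul_le_mul_right _ hlen
          have hdist : (L + 1) ^ (vis.countP (fun b => !b) - 1) * (L + 1)
              = L * (L + 1) ^ (vis.countP (fun b => !b) - 1)
                + (L + 1) ^ (vis.countP (fun b => !b) - 1) := by ring
          rw [hdist] at hpot2
          linarith [hsum, hmul, hX, hpot2]
      rw [ih _ _ hpot', List.foldl_append, foldl_mstep_reverse, foldl_mstep_children]
      have hb : (if best < cost then cost else best) = max best cost := by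
        by_cases hcb : best < cost
        · rw [if_pos hcb, max_eq_right (le_of_lt hcb)]
        · rw [if_neg hcb, max_eq_left (by omega)]
      rw [hb, foldl_stepA_max]
      simp only [List.foldl_cons, mstep, dfsLoopA_true]

theorem graph_deg_le (n : Int) (edges : List (Int × Int × Int)) (m : Int) :
    ((edges.foldl
        (fun g e => (g.modify e.1 [] (fun l => l ++ [(e.2.1, e.2.2)])).modify e.2.1 [] (fun l => l ++ [(e.1, e.2.2)]))
        (PySem.Dict.mk ((PySem.List.pyRange 0 n 1).map (fun i => (i, []))))).getD m []).length
      ≤ 2 * edges.length := by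
  have hinit : ∀ (l : List Int) (k : Int),
      (PySem.Dict.mk (l.map (fun i => (i, ([] : List (Int × Int)))))).getD k [] = [] := by
    intro l
    induction l with
    | nil => intro k; simp [pysem]
    | cons i rest ih =>
      intro k
      have h := ih k
      simp only [PySem.Dict.getD] at h ⊢
      simp only [List.map_cons, PySem.Dict.get?_mk_cons]
      split_ifs <;> simp_all
  have hstep : ∀ (es : List (Int × Int × Int)) (d : PySem.Dict Int (List (Int × Int))) (B : Nat),
      (∀ k, (d.getD k []).length ≤ B) →
      ∀ k, ((es.foldl
          (fun g e => (g.modify e.1 [] (fun l => l ++ [(e.2.1, e.2.2)])).modify e.2.1 [] (fun l => l ++ [(e.1, e.2.2)]))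
          d).getD k []).length ≤ B + 2 * es.length := by
    intro es
    induction es with
    | nil => intro d B hd k; simpa using hd k
    | cons e rest ih =>
      intro d B hd k
      have h2 : ∀ k', (((d.modify e.1 [] (fun l => l ++ [(e.2.1, e.2.2)])).modify e.2.1 []
          (fun l => l ++ [(e.1, e.2.2)])).getD k' []).length ≤ B + 2 := by
        intro k'
        simp only [PySem.Dict.getD_modify]
        have h1 := hd e.1
        have h2 := hd k'
        have h3 := hd e.2.1
        split_ifs <;> simp [List.length_append] <;> omega
      have := ih _ (B + 2) h2 k
      simp only [List.foldl_cons]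
      simp only [List.length_cons] at this ⊢
      omega
  have := hstep edges (PySem.Dict.mk ((PySem.List.pyRange 0 n 1).map (fun i => (i, [])))) 0
    (fun k => by rw [hinit (PySem.List.pyRange 0 n 1) k]; simp) m
  simpa using this

-- ===== VERDICT (by name: the statement is the Claim_ definition above) =====
theorem solve_spec : Claim_equal_solve := by
  unfold Claim_equal_solve
  intro n edges _ _
  unfold Spec_solve solve solve_alt
  dsimp only
  have hV : ((PySem.List.pySetD (PySem.List.pyRepeat [false] n) 0 true).countP (fun b => !b)) ≤ n.toNat := by
    refine le_trans List.countP_le_length ?_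
    rw [PySem.List.pyRepeat_singleton, PySem.List.length_pySetD, List.length_replicate]
  have hfuel : potB (2 * edges.length)
      [((0 : Int), (0 : Int), PySem.List.pySetD (PySem.List.pyRepeat [false] n) 0 true)]
      ≤ (2 * edges.length + 1) ^ n.toNat := by
    simp only [potB, List.map_cons, List.map_nil, List.sum_cons, List.sum_nil, Nat.add_zero]
    exact Nat.pow_le_pow_right (by omega) hV
  rw [runB_eq _ (2 * edges.length) (graph_deg_le n edges) _ _ _ hfuel]
  simp only [List.foldl_cons, List.foldl_nil, mstep, dfsA]
  rw [dfsLoopA_true]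
  exact (max_eq_right (le_foldl_stepA _ _ _ _ _)).symm
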